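-- pv_equiv track=rewrite | github.com/TheDeanLab/CI-Nanocourse | ci_slides/scripts/update_remainder_media.py | parse_headings
-- ===== SOURCE A (Python) =====
-- def parse_headings(block: str) -> tuple[str, str]:
--     h1 = ""
--     h2 = ""
--     for line in block.splitlines():
--         stripped = line.strip()
--         if stripped.startswith("# ") and not h1:
--             h1 = stripped[2:].strip()
--         elif stripped.startswith("## ") and not h2:
--             h2 = stripped[3:].strip()
--     return h1, h2
-- ===== SOURCE B (Python) =====
-- def parse_headings(block: str) -> tuple[str, str]:
--     def first_heading(prefix: str, cut: int) -> str:
--         for line in block.splitlines():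
--             stripped = line.strip()
--             if stripped.startswith(prefix):
--                 title = stripped[cut:].strip()
--                 if title:
--                     return title
--         return ""
--     return first_heading("# ", 2), first_heading("## ", 3)
-- ===== Notes on version B (the rewrite author's own statement) =====
-- stated objective: idiomatic
-- what changed: Replaces the single stateful loop with two flag variables by two independent first-match scans (one per heading level), each returning the first nonempty title and an empty default.
import Mathlib
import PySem

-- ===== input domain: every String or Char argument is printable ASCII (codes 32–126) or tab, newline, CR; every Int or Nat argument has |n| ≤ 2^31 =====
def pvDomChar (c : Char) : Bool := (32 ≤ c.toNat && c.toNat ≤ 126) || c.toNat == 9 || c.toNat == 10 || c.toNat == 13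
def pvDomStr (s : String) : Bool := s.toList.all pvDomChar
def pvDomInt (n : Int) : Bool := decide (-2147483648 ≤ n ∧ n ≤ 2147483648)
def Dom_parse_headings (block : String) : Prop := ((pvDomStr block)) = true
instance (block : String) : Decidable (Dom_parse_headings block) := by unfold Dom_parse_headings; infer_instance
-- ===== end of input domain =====

-- B replaces A's single stateful two-flag loop by two independent first-nonempty-match scans (idiomatic decomposition; same cost).

-- ===== PORT A =====
-- one pass over the lines, carrying the (h1, h2) state, branches in A's order
def parse_headings_step (p : String × String) (line : String) : String × String :=
  let stripped := PySem.Str.strip line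
  if PySem.Str.startswith stripped "# " && (p.1 == "") then
    (PySem.Str.strip (PySem.Str.slice stripped (some 2) none), p.2)
  else if PySem.Str.startswith stripped "## " && (p.2 == "") then
    (p.1, PySem.Str.strip (PySem.Str.slice stripped (some 3) none))
  else p

def parse_headings (block : String) : String × String :=
  (PySem.Str.splitlines block).foldl parse_headings_step ("", "")

-- ===== PORT B =====
-- first matching line whose title (after the prefix) is nonempty; "" if none
def first_heading (pre : String) (cut : Int) : List String → String
  | [] => ""
  | line :: rest =>
    let stripped := PySem.Str.strip line
    if PySem.Str.startswith stripped pre then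
      let title := PySem.Str.strip (PySem.Str.slice stripped (some cut) none)
      if title == "" then first_heading pre cut rest else title
    else first_heading pre cut rest

def parse_headings_alt (block : String) : String × String :=
  (first_heading "# " 2 (PySem.Str.splitlines block),
   first_heading "## " 3 (PySem.Str.splitlines block))

-- ===== PRECONDITION & SPEC =====
def Spec_parse_headings (block : String) (out : String × String) : Prop := out = parse_headings_alt block
instance (block : String) (out : String × String) : Decidable (Spec_parse_headings block out) := by unfold Spec_parse_headings; infer_instance

-- ===== CLAIM (what is proved, stated in full; the proofs are below) =====
def Claim_equal_parse_headings : Prop := ∀ (block : String), Dom_parse_headings block → Spec_parse_headings block (parse_headings block)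

-- ===== LEMMAS AND PROOFS =====

-- a line starting with "## " does not start with "# " (second char differs)
theorem not_startswith_h1_of_h2 (cs : List Char)
    (h : PySem.Chars.startswith cs ['#', '#', ' '] = true) :
    PySem.Chars.startswith cs ['#', ' '] = false := by
  rw [PySem.Chars.startswith_iff] at h
  rw [Bool.eq_false_iff]
  intro hc
  rw [PySem.Chars.startswith_iff] at hc
  obtain ⟨t1, h1⟩ := h
  obtain ⟨t2, h2⟩ := hc
  rw [← h2] at h1
  simp at h1

theorem foldl_step_eq (lines : List String) : ∀ (h1 h2 : String),
    lines.foldl parse_headings_step (h1, h2) =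
      ((if h1 = "" then first_heading "# " 2 lines else h1),
       (if h2 = "" then first_heading "## " 3 lines else h2)) := by
  induction lines with
  | nil => intro h1 h2; simp [first_heading]
  | cons line rest ih =>
    intro h1 h2
    simp only [List.foldl_cons, parse_headings_step, first_heading]
    by_cases hs1 : PySem.Chars.startswith (PySem.Chars.strip line.toList) ['#', ' '] = true
    · have hs2 : PySem.Chars.startswith (PySem.Chars.strip line.toList) ['#', '#', ' '] = false := by
        by_contra hne
        rw [Bool.not_eq_false] at hne
        have hf := not_startswith_h1_of_h2 _ hne
        rw [hs1] at hf
        simp at hf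
      by_cases hh1 : h1 = ""
      · by_cases ht : PySem.Str.strip (PySem.Str.slice (PySem.Str.strip line) (some 2) none) = ""
        · simp [hs1, hs2, hh1, ht, ih]
        · simp [hs1, hs2, hh1, ht, ih]
      · simp [hs1, hs2, hh1, ih]
    · rw [Bool.not_eq_true] at hs1
      by_cases hs2 : PySem.Chars.startswith (PySem.Chars.strip line.toList) ['#', '#', ' '] = true
      · by_cases hh2 : h2 = ""
        · by_cases ht : PySem.Str.strip (PySem.Str.slice (PySem.Str.strip line) (some 3) none) = ""
          · simp [hs1, hs2, hh2, ht, ih]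
          · simp [hs1, hs2, hh2, ht, ih]
        · simp [hs1, hs2, hh2, ih]
      · rw [Bool.not_eq_true] at hs2
        simp [hs1, hs2, ih]

-- ===== VERDICT (by name: the statement is the Claim_ definition above) =====
theorem parse_headings_spec : Claim_equal_parse_headings := by
  intro block _
  unfold Spec_parse_headings parse_headings parse_headings_alt
  rw [foldl_step_eq]
  simp
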